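-- pv_equiv track=rewrite | github.com/JOhnsonKC201/String-Anagram-Checker | String Anagram Checker.py | anagram_solution_1
-- ===== SOURCE A (Python) =====
-- def anagram_solution_1(s1, s2):
--     # implement the function
--
--     for _ in [" ", "$", "'", ",", ".", "!", "?"]:
--         s1 = s1.replace(_, "")
--         s2 = s2.replace(_, "")
--
--     # _anged those string to list
--     list1 = list(s1)
--     list2 = list(s2)
--
--     #_ecking the length of s1 = s2
--     if len(list1)!= len(list2):
--         return False
--
--     cntr1 = 0
--     still_OK = True
--     while cntr1 < len(list1) and still_OK:
--         cntr2 = 0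
--         found = False
--         while cntr2 < len(list2) and not found:
--             if list1[cntr1] == list2[cntr2]:
--                 found = True
--             else:
--                 cntr2 = cntr2 +1
--         if found:
--             list2[cntr2]= None
--         else:
--             still_OK = False
--         cntr1= cntr1 +1
--     return still_OK
-- ===== SOURCE B (Python) =====
-- def anagram_solution_1(s1, s2):
--     for ch in [" ", "$", "'", ",", ".", "!", "?"]:
--         s1 = s1.replace(ch, "")
--         s2 = s2.replace(ch, "")
--     return sorted(s1) == sorted(s2)
-- ===== Notes on version B (the rewrite author's own statement) =====
-- stated objective: simpler
-- what changed: Replaces A's quadratic nested linear-search-and-mark-None matching loop by stripping the same punctuation and comparing sorted character lists.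
import Mathlib
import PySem

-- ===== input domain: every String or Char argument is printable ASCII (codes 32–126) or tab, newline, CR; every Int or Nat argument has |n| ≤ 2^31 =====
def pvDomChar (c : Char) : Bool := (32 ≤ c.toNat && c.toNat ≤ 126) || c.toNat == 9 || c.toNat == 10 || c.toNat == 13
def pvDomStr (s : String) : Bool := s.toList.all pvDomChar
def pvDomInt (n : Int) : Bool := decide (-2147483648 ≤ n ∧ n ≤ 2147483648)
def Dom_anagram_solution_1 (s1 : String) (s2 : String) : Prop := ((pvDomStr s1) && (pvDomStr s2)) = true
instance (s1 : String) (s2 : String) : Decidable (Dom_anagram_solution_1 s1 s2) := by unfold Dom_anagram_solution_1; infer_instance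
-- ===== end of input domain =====

-- ===== PORT A =====
-- B changes A's nested linear-search/mark-None matching into sort-then-compare (objective: simpler, and asymptotically fewer comparisons).
-- Inner while loop of A: find the first index of list2 still holding c (None-marked cells compare unequal to a char, as in Python).
def pvFindMark (c : Char) : List (Option Char) → Option (List (Option Char))
  | [] => none
  | x :: xs =>
    if x = some c then some (none :: xs)
    else match pvFindMark c xs with
      | some xs' => some (x :: xs')
      | none => none

-- Outer while loop of A: consume list1 left to right, marking the found cell, stopping with False when a char is not found.
def pvLoopA : List Char → List (Option Char) → Bool
  | [], _ => true
  | c :: rest, l2 =>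
    match pvFindMark c l2 with
    | some l2' => pvLoopA rest l2'
    | none => false

def anagram_solution_1 (s1 : String) (s2 : String) : Bool :=
  let p := [" ", "$", "'", ",", ".", "!", "?"].foldl
    (fun (q : String × String) ch => (PySem.Str.replace q.1 ch "", PySem.Str.replace q.2 ch "")) (s1, s2)
  let list1 := p.1.toList
  let list2 := p.2.toList.map some
  if list1.length ≠ list2.length then false
  else pvLoopA list1 list2

-- ===== PORT B =====
def anagram_solution_1_alt (s1 : String) (s2 : String) : Bool :=
  let p := [" ", "$", "'", ",", ".", "!", "?"].foldl
    (fun (q : String × String) ch => (PySem.Str.replace q.1 ch "", PySem.Str.replace q.2 ch "")) (s1, s2)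
  decide (PySem.List.sorted p.1.toList (fun x => x) false = PySem.List.sorted p.2.toList (fun x => x) false)

-- ===== PRECONDITION & SPEC =====
def Spec_anagram_solution_1 (s1 : String) (s2 : String) (out : Bool) : Prop := out = anagram_solution_1_alt s1 s2
instance (s1 : String) (s2 : String) (out : Bool) : Decidable (Spec_anagram_solution_1 s1 s2 out) := by unfold Spec_anagram_solution_1; infer_instance

-- ===== CLAIM (what is proved, stated in full; the proofs are below) =====
def Claim_equal_anagram_solution_1 : Prop := ∀ (s1 : String) (s2 : String), Dom_anagram_solution_1 s1 s2 → Spec_anagram_solution_1 s1 s2 (anagram_solution_1 s1 s2)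

-- ===== LEMMAS AND PROOFS =====

theorem pvFindMark_none {c : Char} {l2 : List (Option Char)} :
    pvFindMark c l2 = none ↔ some c ∉ l2 := by
  induction l2 with
  | nil => simp [pvFindMark]
  | cons x xs ih =>
    by_cases hx : x = some c
    · simp [pvFindMark, hx]
    · cases hfm : pvFindMark c xs with
      | some xs' =>
        have hin : some c ∈ xs := by
          by_contra hn
          simp [ih.mpr hn] at hfm
        simp [pvFindMark, hx, hfm, hin]
      | none =>
        have hnotin : some c ∉ xs := ih.mp hfm
        simp only [pvFindMark, if_neg hx, hfm, List.mem_cons, not_or, true_iff]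
        exact ⟨fun h => hx h.symm, hnotin⟩

theorem pvFindMark_some {c : Char} {l2 l2' : List (Option Char)}
    (h : pvFindMark c l2 = some l2') :
    l2'.filterMap id = (l2.filterMap id).erase c := by
  induction l2 generalizing l2' with
  | nil => simp [pvFindMark] at h
  | cons x xs ih =>
    by_cases hx : x = some c
    · simp only [pvFindMark, if_pos hx, Option.some.injEq] at h
      subst hx; subst h
      simp
    · simp only [pvFindMark, if_neg hx] at h
      cases hfm : pvFindMark c xs with
      | none => rw [hfm] at h; simp at h
      | some xs' =>
        rw [hfm] at h
        simp only [Option.some.injEq] at h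
        subst h
        have hrec := ih hfm
        cases x with
        | none => simpa [List.filterMap_cons] using hrec
        | some d =>
          have hdc : (d == c) = false := by
            simp only [beq_eq_false_iff_ne, ne_eq]
            intro hh; exact hx (by rw [hh])
          simp only [List.filterMap_cons, id, List.erase_cons, hdc]
          simp only [Bool.false_eq_true, if_false, List.cons.injEq, true_and]
          exact hrec

theorem pvLoopA_iff (l1 : List Char) (l2 : List (Option Char)) :
    pvLoopA l1 l2 = true ↔ List.Subperm l1 (l2.filterMap id) := by
  induction l1 generalizing l2 with
  | nil => simp [pvLoopA, List.nil_subperm]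
  | cons c rest ih =>
    cases hfm : pvFindMark c l2 with
    | none =>
      have hnot : c ∉ l2.filterMap id := by
        have hno := pvFindMark_none.mp hfm
        simp only [List.mem_filterMap]
        rintro ⟨o, ho, hid⟩
        cases o with
        | none => simp at hid
        | some d => simp only [id, Option.some.injEq] at hid; subst hid; exact hno ho
      simp only [pvLoopA, hfm]
      constructor
      · intro h; simp at h
      · intro h
        exact absurd (h.subset List.mem_cons_self) hnot
    | some l2' =>
      have hmem : c ∈ l2.filterMap id := by
        have hs : some c ∈ l2 := by
          by_contra hn
          rw [← pvFindMark_none] at hn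
          rw [hfm] at hn; simp at hn
        exact List.mem_filterMap.mpr ⟨some c, hs, rfl⟩
      simp only [pvLoopA, hfm]
      rw [ih, pvFindMark_some hfm]
      constructor
      · intro h2
        exact ((List.subperm_cons c).mpr h2).trans (List.perm_cons_erase hmem).symm.subperm
      · intro h2
        exact (List.subperm_cons c).mp (h2.trans (List.perm_cons_erase hmem).subperm)

theorem pvLoopA_allSome (l1 l2 : List Char) (hlen : l1.length = l2.length) :
    pvLoopA l1 (l2.map some) = true ↔ l1.Perm l2 := by
  rw [pvLoopA_iff]
  have hfm : (l2.map some).filterMap id = l2 := by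
    simp [List.filterMap_map]
  rw [hfm]
  constructor
  · intro h
    exact h.perm_of_length_le (le_of_eq hlen.symm)
  · intro h
    exact h.subperm

theorem pvCore_eq (t1 t2 : List Char) :
    (if t1.length ≠ (t2.map some).length then false else pvLoopA t1 (t2.map some)) =
      decide (PySem.List.sorted t1 (fun x => x) false = PySem.List.sorted t2 (fun x => x) false) := by
  by_cases h : t1.length = t2.length
  · rw [if_neg (by simpa using h)]
    rw [Bool.eq_iff_iff, decide_eq_true_iff, pvLoopA_allSome t1 t2 h,
      PySem.List.sorted_id_eq_sorted_id_iff_perm]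
  · rw [if_pos (by simpa using h)]
    symm
    rw [decide_eq_false_iff_not, PySem.List.sorted_id_eq_sorted_id_iff_perm]
    intro hp
    exact h hp.length_eq

-- ===== VERDICT (by name: the statement is the Claim_ definition above) =====
theorem anagram_solution_1_spec : Claim_equal_anagram_solution_1 := by
  intro s1 s2 _
  unfold Spec_anagram_solution_1 anagram_solution_1 anagram_solution_1_alt
  exact pvCore_eq _ _
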